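-- pv_equiv track=rewrite | github.com/MyPyDavid/elchempy | src/elchempy/indexer/_depr_EC_filename_parser.py | _clean_up_comment
-- ===== SOURCE A (Python) =====
-- def _clean_up_comment(ch):
--
--     splt_clean = [i for i in ch.split("\n")[1:-1] if i]
--     _comment = [
--         (n, i) for n, i in enumerate(splt_clean) if i.startswith("Comment=")
--     ]
--     if _comment:
--         _new_comment = ", ".join(str(i) for i in splt_clean[_comment[0][0] :])
--         _new_splt = splt_clean[: _comment[0][0]] + [_new_comment]
--         return [i.split("=") for i in _new_splt]
--     else:
--         return [i.split("=") for i in splt_clean]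
-- ===== SOURCE B (Python) =====
-- def _clean_up_comment(ch):
--     before = []
--     tail = []
--     found = False
--     for line in ch.split("\n")[1:-1]:
--         if not line:
--             continue
--         if found or line.startswith("Comment="):
--             found = True
--             tail.append(line)
--         else:
--             before.append(line)
--     result = before + [", ".join(tail)] if found else before
--     return [x.split("=") for x in result]
-- ===== Notes on version B (the rewrite author's own statement) =====
-- stated objective: simpler
-- what changed: Replaces the enumerate-filter index computation plus two slices with a single pass that accumulates the lines before the first comment-marker line and the tail from it on, using a found flag.
import Mathlib
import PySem

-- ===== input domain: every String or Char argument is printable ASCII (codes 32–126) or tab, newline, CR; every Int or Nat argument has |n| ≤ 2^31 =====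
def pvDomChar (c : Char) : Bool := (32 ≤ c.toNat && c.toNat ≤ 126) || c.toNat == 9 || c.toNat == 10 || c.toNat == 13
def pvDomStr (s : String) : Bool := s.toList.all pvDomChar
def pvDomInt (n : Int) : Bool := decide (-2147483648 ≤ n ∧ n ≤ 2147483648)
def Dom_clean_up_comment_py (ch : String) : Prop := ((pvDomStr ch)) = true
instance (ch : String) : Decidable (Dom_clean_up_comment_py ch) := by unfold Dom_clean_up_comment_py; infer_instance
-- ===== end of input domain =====

-- B replaces A's enumerate-filter index computation plus two slices by one accumulator pass (objective: simpler).

-- ===== PORT A =====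
-- s.split(sep) with the literal nonempty sep: split? is some here, getD [] is never taken
def clean_up_comment_py (ch : String) : List (List String) :=
  let splt_clean := (PySem.List.slice ((PySem.Str.split? ch "\n").getD []) (some 1) (some (-1))).filter
    (fun i => i != "")
  let _comment := (PySem.List.enumerate splt_clean 0).filter
    (fun p => PySem.Str.startswith p.2 "Comment=")
  match _comment with
  | (n, _) :: _ =>
    -- str(i) on a str is the identity, so the generator is the slice itself
    let _new_comment := PySem.Str.join ", " (PySem.List.slice splt_clean (some n) none)
    let _new_splt := PySem.List.slice splt_clean none (some n) ++ [_new_comment]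
    _new_splt.map (fun i => (PySem.Str.split? i "=").getD [])
  | [] => splt_clean.map (fun i => (PySem.Str.split? i "=").getD [])

-- ===== PORT B =====
-- the loop predicate: line.startswith("Comment=")
def pvP (s : String) : Bool := PySem.Str.startswith s "Comment="

-- one step of B's loop over (before, tail, found)
def pvStepB (st : List String × List String × Bool) (line : String) :
    List String × List String × Bool :=
  if line == "" then st
  else if st.2.2 || pvP line then (st.1, st.2.1 ++ [line], true)
  else (st.1 ++ [line], st.2.1, st.2.2)

def clean_up_comment_py_alt (ch : String) : List (List String) :=
  let st := (PySem.List.slice ((PySem.Str.split? ch "\n").getD []) (some 1) (some (-1))).foldl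
    pvStepB ([], [], false)
  let result := if st.2.2 then st.1 ++ [PySem.Str.join ", " st.2.1] else st.1
  result.map (fun x => (PySem.Str.split? x "=").getD [])

-- ===== PRECONDITION & SPEC =====
def Spec_clean_up_comment_py (ch : String) (out : List (List String)) : Prop := out = clean_up_comment_py_alt ch
instance (ch : String) (out : List (List String)) : Decidable (Spec_clean_up_comment_py ch out) := by unfold Spec_clean_up_comment_py; infer_instance

-- ===== CLAIM (what is proved, stated in full; the proofs are below) =====
def Claim_equal_clean_up_comment_py : Prop := ∀ (ch : String), Dom_clean_up_comment_py ch → Spec_clean_up_comment_py ch (clean_up_comment_py ch)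

-- ===== LEMMAS AND PROOFS =====

-- B's fold skips empty lines: it equals the fold over the filtered list
theorem foldB_filter (xs : List String) (st : List String × List String × Bool) :
    xs.foldl pvStepB st = (xs.filter (fun i => i != "")).foldl pvStepB st := by
  induction xs generalizing st with
  | nil => rfl
  | cons x xs ih =>
    by_cases hx : x = ""
    · subst hx
      simp [List.foldl, List.filter, pvStepB, ih]
    · have hx' : (x != "") = true := by simp [hx]
      simp [List.foldl, List.filter, hx', pvStepB, hx, ih]

-- once found, everything goes to the tail
theorem foldB_found (xs : List String) (b t : List String)
    (hxs : ∀ x ∈ xs, x ≠ "") :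
    xs.foldl pvStepB (b, t, true) = (b, t ++ xs, true) := by
  induction xs generalizing t with
  | nil => simp
  | cons x xs ih =>
    have hx : (x == "") = false := by simpa using hxs x (List.mem_cons_self)
    simp only [List.foldl, pvStepB, hx, Bool.false_eq_true, if_false, Bool.true_or, if_true]
    rw [ih _ (fun y hy => hxs y (List.mem_cons_of_mem _ hy))]
    simp

-- the fold from a not-found state splits at the first pvP-line
theorem foldB_notfound (xs : List String) (b : List String)
    (hxs : ∀ x ∈ xs, x ≠ "") :
    xs.foldl pvStepB (b, [], false) =
      (b ++ xs.takeWhile (fun x => !pvP x), xs.dropWhile (fun x => !pvP x),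
        !(xs.dropWhile (fun x => !pvP x)).isEmpty) := by
  induction xs generalizing b with
  | nil => simp
  | cons x xs ih =>
    have hx : (x == "") = false := by simpa using hxs x (List.mem_cons_self)
    have hrest : ∀ y ∈ xs, y ≠ "" := fun y hy => hxs y (List.mem_cons_of_mem _ hy)
    by_cases hp : pvP x
    · simp only [List.foldl, pvStepB, hx, Bool.false_eq_true, if_false, Bool.false_or, hp,
        if_true, List.nil_append]
      rw [foldB_found xs b [x] hrest]
      simp [hp]
    · have hp' : pvP x = false := by simpa using hp
      simp only [List.foldl, pvStepB, hx, Bool.false_eq_true, if_false, Bool.false_or, hp',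
        if_false]
      rw [ih _ hrest]
      simp [hp', List.append_assoc]

-- head? of the enumerate-filter list, as takeWhile/dropWhile (abstract predicate q)
theorem enumFilter_head? (q : String → Bool) (xs : List String) (s : Int) :
    ((PySem.List.enumerate xs s).filter (fun p => q p.2)).head? =
      (xs.dropWhile (fun x => !q x)).head?.map
        (fun x => (s + ((xs.takeWhile (fun x => !q x)).length : Int), x)) := by
  induction xs generalizing s with
  | nil => simp [PySem.List.enumerate_nil]
  | cons x xs ih =>
    by_cases hp : q x
    · simp [PySem.List.enumerate_cons, hp]
    · have hp' : q x = false := by simpa using hp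
      have harith : ∀ y : String, (s + 1 + ((xs.takeWhile (fun x => !q x)).length : Int), y)
          = (s + (((x :: xs).takeWhile (fun x => !q x)).length : Int), y) := by
        intro y
        simp [hp']
        ring_nf
      simp only [PySem.List.enumerate_cons, List.filter_cons, hp', Bool.false_eq_true,
        if_false, ih (s + 1), List.dropWhile_cons, Bool.not_false, if_true]
      cases (xs.dropWhile (fun x => !q x)).head? with
      | none => simp
      | some y => simp [harith y]

-- take/drop at the takeWhile-length give takeWhile/dropWhile
theorem take_len_takeWhile {α : Type} (p : α → Bool) (xs : List α) :
    xs.take (xs.takeWhile p).length = xs.takeWhile p := by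
  induction xs with
  | nil => rfl
  | cons x xs ih =>
    by_cases hp : p x <;> simp [hp, ih]

theorem drop_len_takeWhile {α : Type} (p : α → Bool) (xs : List α) :
    xs.drop (xs.takeWhile p).length = xs.dropWhile p := by
  induction xs with
  | nil => rfl
  | cons x xs ih =>
    by_cases hp : p x <;> simp [hp, ih]

-- ===== VERDICT (by name: the statement is the Claim_ definition above) =====
theorem clean_up_comment_py_spec : Claim_equal_clean_up_comment_py := by
  intro ch _
  unfold Spec_clean_up_comment_py clean_up_comment_py clean_up_comment_py_alt
  have hpred : (fun (p : Int × String) => PySem.Str.startswith p.2 "Comment=")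
      = (fun p => pvP p.2) := rfl
  rw [hpred]
  set l := PySem.List.slice ((PySem.Str.split? ch "\n").getD []) (some 1) (some (-1)) with hl
  set xs := l.filter (fun i => i != "") with hxs
  have hne : ∀ x ∈ xs, x ≠ "" := by
    intro x hx
    have := List.of_mem_filter hx
    simpa using this
  rw [foldB_filter, ← hxs, foldB_notfound xs [] hne]
  have hh := enumFilter_head? pvP xs 0
  set tw := xs.takeWhile (fun x => !pvP x) with htw
  set dw := xs.dropWhile (fun x => !pvP x) with hdw
  cases hd : dw with
  | nil =>
    have he : (PySem.List.enumerate xs 0).filter (fun p => pvP p.2) = [] := by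
      apply List.head?_eq_none_iff.mp
      rw [hh, hd]
      rfl
    have hxt : xs = tw := by
      have := xs.takeWhile_append_dropWhile (p := fun x => !pvP x)
      rw [← htw, ← hdw, hd] at this
      simpa using this.symm
    simp only [he]
    simp [← hxt]
  | cons d ds =>
    have hsome : ((PySem.List.enumerate xs 0).filter (fun p => pvP p.2)).head?
        = some (((tw.length : Int)), d) := by
      rw [hh, hd]
      simp
    rcases List.head?_eq_some_iff.mp hsome with ⟨rest, hrest⟩
    simp only [hrest]
    have h1 : PySem.List.slice xs (some ((tw.length : Nat) : Int)) none = dw := by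
      rw [PySem.List.slice_from_natCast, htw, hdw, drop_len_takeWhile]
    have h2 : PySem.List.slice xs none (some ((tw.length : Nat) : Int)) = tw := by
      rw [PySem.List.slice_to_natCast, htw, take_len_takeWhile]
    simp [h1, h2, hd]
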